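-- pv_equiv track=rewrite | github.com/MB-29/kernel-challenge | spectrum_kernel.py | substring_ressemblance
-- ===== SOURCE A (Python) =====
-- from collections import Counter
--
-- def substring_ressemblance(x, y, k):
--     x_substrings = [x[index:index+k] for index in range(len(x)-k+1)]
--     y_substrings = [y[index:index+k] for index in range(len(y)-k+1)]
--     x_counts = Counter(x_substrings)
--     y_counts = Counter(y_substrings)
--     substrings = set(x_counts.keys()).intersection(set(y_counts.keys()))
--     K = 0
--     for string in substrings:
--         K += x_counts[string] * y_counts[string]
--     return K
-- ===== SOURCE B (Python) =====
-- def substring_ressemblance(x, y, k):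
--     counts = {}
--     n = len(y) - k + 1
--     i = 0
--     while i < n:
--         s = y[i:i+k]
--         counts[s] = counts.get(s, 0) + 1
--         i += 1
--     K = 0
--     m = len(x) - k + 1
--     j = 0
--     while j < m:
--         K += counts.get(x[j:j+k], 0)
--         j += 1
--     return K
-- ===== Notes on version B (the rewrite author's own statement) =====
-- stated objective: alternative
-- what changed: B drops A's two Counters, key sets and intersection: it builds one count table of y's k-mers by hand with a while loop and dict.get, then streams over x's k-mer positions adding counts.get(kmer, 0); summing y's count once per x occurrence equals A's sum of count products over shared keys.
import Mathlib
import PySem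

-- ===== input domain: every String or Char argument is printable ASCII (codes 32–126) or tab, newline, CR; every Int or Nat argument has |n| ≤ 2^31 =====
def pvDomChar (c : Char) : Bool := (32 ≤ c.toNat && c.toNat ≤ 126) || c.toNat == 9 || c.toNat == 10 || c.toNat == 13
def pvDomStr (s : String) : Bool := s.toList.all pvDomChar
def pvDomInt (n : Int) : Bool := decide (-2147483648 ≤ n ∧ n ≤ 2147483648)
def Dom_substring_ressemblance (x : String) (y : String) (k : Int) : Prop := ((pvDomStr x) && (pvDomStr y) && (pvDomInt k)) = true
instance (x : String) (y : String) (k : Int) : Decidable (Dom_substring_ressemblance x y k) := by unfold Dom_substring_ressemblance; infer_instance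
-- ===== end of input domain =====

-- B drops A's two Counters, key sets and intersection: it builds one count table of
-- y's k-mers by hand (while loop, dict.get) and streams over x's k-mer positions
-- adding counts.get(kmer, 0); objective: alternative (same value, one dict, two passes).

-- ===== PORT A =====
def substring_ressemblance (x : String) (y : String) (k : Int) : Int :=
  let x_substrings := (PySem.List.pyRange 0 (PySem.Str.len x - k + 1) 1).map
    (fun index => PySem.Str.slice x (some index) (some (index + k)))
  let y_substrings := (PySem.List.pyRange 0 (PySem.Str.len y - k + 1) 1).map
    (fun index => PySem.Str.slice y (some index) (some (index + k)))
  let x_counts := PySem.Dict.counter x_substrings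
  let y_counts := PySem.Dict.counter y_substrings
  let substrings := PySem.Set.inter (PySem.Set.ofList x_counts.keys) (PySem.Set.ofList y_counts.keys)
  substrings.foldl (fun K string => K + x_counts.getD string 0 * y_counts.getD string 0) 0

-- ===== PORT B =====
-- while i < n: counts[s] = counts.get(s, 0) + 1; i += 1
def pvBuildCounts (y : String) (k : Int) (n : Int) (i : Int) (counts : PySem.Dict String Int) : PySem.Dict String Int :=
  if i < n then
    let s := PySem.Str.slice y (some i) (some (i + k))
    pvBuildCounts y k n (i + 1) (counts.insert s (counts.getD s 0 + 1))
  else counts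
termination_by (n - i).toNat
decreasing_by omega

-- while j < m: K += counts.get(x[j:j+k], 0); j += 1
def pvSumCounts (x : String) (k : Int) (counts : PySem.Dict String Int) (m : Int) (j : Int) (K : Int) : Int :=
  if j < m then
    pvSumCounts x k counts m (j + 1) (K + counts.getD (PySem.Str.slice x (some j) (some (j + k))) 0)
  else K
termination_by (m - j).toNat
decreasing_by omega

def substring_ressemblance_alt (x : String) (y : String) (k : Int) : Int :=
  pvSumCounts x k (pvBuildCounts y k (PySem.Str.len y - k + 1) 0 PySem.Dict.empty)
    (PySem.Str.len x - k + 1) 0 0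

-- ===== PRECONDITION & SPEC =====
def Spec_substring_ressemblance (x : String) (y : String) (k : Int) (out : Int) : Prop := out = substring_ressemblance_alt x y k
instance (x : String) (y : String) (k : Int) (out : Int) : Decidable (Spec_substring_ressemblance x y k out) := by unfold Spec_substring_ressemblance; infer_instance

-- ===== CLAIM (what is proved, stated in full; the proofs are below) =====
def Claim_equal_substring_ressemblance : Prop := ∀ (x : String) (y : String) (k : Int), Dom_substring_ressemblance x y k → Spec_substring_ressemblance x y k (substring_ressemblance x y k)

-- ===== LEMMAS AND PROOFS =====

-- The dict built by B's first while loop counts each k-mer of y's slice list.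
theorem pvBuild_getD (y : String) (k : Int) (n i : Int) (d : PySem.Dict String Int) (s : String) :
    (pvBuildCounts y k n i d).getD s 0
    = d.getD s 0 + (List.count s ((PySem.List.pyRange i n 1).map
        (fun idx => PySem.Str.slice y (some idx) (some (idx + k)))) : Int) := by
  fun_induction pvBuildCounts y k n i d with
  | case1 i d h s' ih =>
      rw [ih, PySem.List.pyRange_one_cons h, List.map_cons, List.count_cons,
        PySem.Dict.getD_insert]
      by_cases hs : s = s'
      · subst hs
        rw [if_pos rfl]
        have hb : (s' == PySem.Str.slice y (some i) (some (i + k))) = true :=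
          beq_self_eq_true s'
        rw [hb, if_pos rfl]
        push_cast; ring
      · rw [if_neg hs]
        have hb : (PySem.Str.slice y (some i) (some (i + k)) == s) = false := by
          simpa [beq_eq_false_iff_ne] using fun e => hs e.symm
        rw [hb]
        simp
  | case2 i d h =>
      have : PySem.List.pyRange i n 1 = [] := by
        rw [PySem.List.pyRange_one]
        have : (n - i).toNat = 0 := by omega
        simp [this]
      simp [this]

-- B's second while loop adds counts.get over x's slice positions.
theorem pvSum_eq (x : String) (k : Int) (d : PySem.Dict String Int) (m j K : Int) :
    pvSumCounts x k d m j K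
    = K + ((PySem.List.pyRange j m 1).map
        (fun idx => d.getD (PySem.Str.slice x (some idx) (some (idx + k))) 0)).sum := by
  fun_induction pvSumCounts x k d m j K with
  | case1 j K h ih =>
      rw [ih, PySem.List.pyRange_one_cons h, List.map_cons, List.sum_cons]
      ring
  | case2 j K h =>
      have : PySem.List.pyRange j m 1 = [] := by
        rw [PySem.List.pyRange_one]
        have : (m - j).toNat = 0 := by omega
        simp [this]
      simp [this]

-- Core counting identity: the sum of count products over the distinct shared elements
-- equals the sum over all elements s of xs of count s ys.
theorem pv_inter_sum (xs ys : List String) :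
    (PySem.Set.inter (PySem.Set.ofList xs) (PySem.Set.ofList ys)).foldl
      (fun K s => K + (List.count s xs : Int) * (List.count s ys : Int)) 0
    = xs.foldl (fun K s => K + (List.count s ys : Int)) 0 := by
  rw [PySem.List.foldl_add, PySem.List.foldl_add, zero_add, zero_add]
  have hnd : (PySem.Set.inter (PySem.Set.ofList xs) (PySem.Set.ofList ys)).Nodup :=
    PySem.Set.nodup_inter _ _ (PySem.Set.nodup_ofList xs)
  rw [← List.sum_toFinset _ hnd, Finset.sum_list_map_count]
  have hfin : (PySem.Set.inter (PySem.Set.ofList xs) (PySem.Set.ofList ys)).toFinset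
      = xs.toFinset ∩ ys.toFinset := by
    ext s
    simp [List.mem_toFinset, PySem.Set.mem_inter, PySem.Set.mem_ofList]
  rw [hfin]
  have hsub : xs.toFinset ∩ ys.toFinset ⊆ xs.toFinset := Finset.inter_subset_left
  calc ∑ s ∈ xs.toFinset ∩ ys.toFinset, (List.count s xs : Int) * (List.count s ys : Int)
      = ∑ s ∈ xs.toFinset, (List.count s xs : Int) * (List.count s ys : Int) := by
        refine Finset.sum_subset hsub (fun s hsx hns => ?_)
        have hy : s ∉ ys := fun hmem =>
          hns (Finset.mem_inter.mpr ⟨hsx, List.mem_toFinset.mpr hmem⟩)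
        simp [List.count_eq_zero_of_not_mem hy]
    _ = ∑ m ∈ xs.toFinset, List.count m xs • (List.count m ys : Int) :=
        Finset.sum_congr rfl (fun s _ => by push_cast [nsmul_eq_mul]; ring)

theorem substring_ressemblance_eq (x y : String) (k : Int) :
    substring_ressemblance x y k = substring_ressemblance_alt x y k := by
  unfold substring_ressemblance_alt
  rw [pvSum_eq, zero_add]
  have hb : ∀ s, (pvBuildCounts y k (PySem.Str.len y - k + 1) 0 PySem.Dict.empty).getD s 0
      = (List.count s ((PySem.List.pyRange 0 (PySem.Str.len y - k + 1) 1).map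
          (fun idx => PySem.Str.slice y (some idx) (some (idx + k)))) : Int) := by
    intro s; rw [pvBuild_getD]; simp [PySem.Dict.getD]
  simp only [hb]
  simp only [substring_ressemblance]
  simp only [PySem.Dict.keys_counter, PySem.Set.ofList_ofList, PySem.Dict.getD_counter]
  rw [pv_inter_sum, PySem.List.foldl_add, zero_add, List.map_map]
  rfl

-- ===== VERDICT (by name: the statement is the Claim_ definition above) =====
theorem substring_ressemblance_spec : Claim_equal_substring_ressemblance := by
  intro x y k _
  unfold Spec_substring_ressemblance
  exact substring_ressemblance_eq x y k
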